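-- pv_equiv track=rewrite | github.com/xihaopark/Agent-complexity | main/finish/workflow_candidates/gersteinlab__ASTRO/python/ASTRO/demultiplexer2.py | total_delete
-- ===== SOURCE A (Python) =====
-- def total_delete(all_stats):
--     total_read_count = set()
--     total_read_delete = set()
--     for read_count, read_delete in all_stats:
--         for read_name in read_count:
--             if read_name in total_read_count:
--                 total_read_delete.add(read_name)
--             else:
--                 total_read_count.add(read_name)
--         for read_name in read_delete:
--             total_read_delete.add(read_name)
--     return total_read_delete
-- ===== SOURCE B (Python) =====
-- def total_delete(all_stats):
--     # Phase 1: flatten everything into one ordered event stream.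
--     events = [(kind, name)
--               for read_count, read_delete in all_stats
--               for kind, group in (("count", read_count), ("delete", read_delete))
--               for name in group]
--     # Phase 2: index of the first "count" occurrence of each name.
--     first = {}
--     for i, (kind, name) in enumerate(events):
--         if kind == "count" and name not in first:
--             first[name] = i
--     # Phase 3: an occurrence is flagged if it is a delete, or a repeat count.
--     flagged = [name for i, (kind, name) in enumerate(events)
--                if kind == "delete" or first[name] < i]
--     return set(flagged)
-- ===== Notes on version B (the rewrite author's own statement) =====
-- stated objective: alternative
-- what changed: A's single interleaved pass that mutates two growing sets (add-to-delete on second sight) is replaced by three separate phases: flatten all pairs into one tagged event stream, build a first-occurrence index for count names in one pass, then filter repeat-count and delete occurrences and deduplicate the result.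
import Mathlib
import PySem

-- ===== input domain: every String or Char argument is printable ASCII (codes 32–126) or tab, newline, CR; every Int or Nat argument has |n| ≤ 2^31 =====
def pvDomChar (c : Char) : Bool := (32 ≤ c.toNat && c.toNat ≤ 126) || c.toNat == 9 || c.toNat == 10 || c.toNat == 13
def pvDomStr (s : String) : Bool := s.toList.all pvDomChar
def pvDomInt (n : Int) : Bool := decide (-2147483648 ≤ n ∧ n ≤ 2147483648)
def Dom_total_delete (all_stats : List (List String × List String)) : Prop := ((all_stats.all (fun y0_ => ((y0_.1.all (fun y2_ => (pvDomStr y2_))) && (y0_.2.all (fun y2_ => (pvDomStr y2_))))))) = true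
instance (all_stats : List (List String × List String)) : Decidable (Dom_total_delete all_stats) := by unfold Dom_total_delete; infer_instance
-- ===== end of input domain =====

-- B replaces A's incremental two-set single pass by three phases over a flattened event
-- stream (flatten; index first count-occurrences; filter repeats/deletes, then dedup);
-- objective: alternative decomposition, same asymptotic cost.
-- Python returns a set; outputs are compared as finite sets (here the ports agree as lists).

-- ===== PORT A =====
def total_delete (all_stats : List (List String × List String)) : List String :=
  (all_stats.foldl
    (fun (st : PySem.Set String × PySem.Set String) pair =>
      let st1 := pair.1.foldl
        (fun (st : PySem.Set String × PySem.Set String) read_name =>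
          if PySem.Set.contains st.1 read_name then
            (st.1, PySem.Set.add st.2 read_name)
          else
            (PySem.Set.add st.1 read_name, st.2)) st
      (st1.1, pair.2.foldl (fun td read_name => PySem.Set.add td read_name) st1.2))
    (PySem.Set.empty, PySem.Set.empty)).2

-- ===== PORT B =====
-- 'count' events are tagged true, 'delete' events false
def pvEvents (all_stats : List (List String × List String)) : List (Bool × String) :=
  all_stats.flatMap (fun p =>
    p.1.map (fun name => (true, name)) ++ p.2.map (fun name => (false, name)))

def pvFirst (events : List (Bool × String)) : PySem.Dict String Int :=
  (PySem.List.enumerate events 0).foldl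
    (fun d p => if p.2.1 && !(d.contains p.2.2) then d.insert p.2.2 p.1 else d)
    PySem.Dict.empty

def total_delete_alt (all_stats : List (List String × List String)) : List String :=
  let events := pvEvents all_stats
  let first := pvFirst events
  let flagged := (PySem.List.enumerate events 0).filterMap (fun p =>
    if p.2.1 = false then some p.2.2
    else match first.get? p.2.2 with
      | some j => if j < p.1 then some p.2.2 else none
      | none => none)   -- unreachable: every count name is a key of `first` (KeyError never raised)
  PySem.Set.ofList flagged

-- ===== PRECONDITION & SPEC =====
def Spec_total_delete (all_stats : List (List String × List String)) (out : List String) : Prop := out = total_delete_alt all_stats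
instance (all_stats : List (List String × List String)) (out : List String) : Decidable (Spec_total_delete all_stats out) := by unfold Spec_total_delete; infer_instance

-- ===== CLAIM (what is proved, stated in full; the proofs are below) =====
def Claim_equal_total_delete : Prop := ∀ (all_stats : List (List String × List String)), Dom_total_delete all_stats → Spec_total_delete all_stats (total_delete all_stats)

-- ===== LEMMAS AND PROOFS =====

-- A's per-event step, over the flattened event stream
def pvStep (st : PySem.Set String × PySem.Set String) (e : Bool × String) :
    PySem.Set String × PySem.Set String :=
  if e.1 then
    (if PySem.Set.contains st.1 e.2 then (st.1, PySem.Set.add st.2 e.2)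
     else (PySem.Set.add st.1 e.2, st.2))
  else (st.1, PySem.Set.add st.2 e.2)

-- reference recursion: names flagged while scanning `rest` with prefix `pre` already seen
def pvFlags (pre rest : List (Bool × String)) : List String :=
  match rest with
  | [] => []
  | e :: rest' =>
    (if e.1 = false ∨ (true, e.2) ∈ pre then [e.2] else []) ++ pvFlags (pre ++ [e]) rest'

lemma snd_fold (l : List String) (st : PySem.Set String × PySem.Set String) :
    l.foldl (fun x y => (x.1, PySem.Set.add x.2 y)) st = (st.1, l.foldl PySem.Set.add st.2) := by
  induction l generalizing st with
  | nil => rfl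
  | cons a l ih => simp [ih]

lemma foldl_A_events (all_stats : List (List String × List String))
    (st : PySem.Set String × PySem.Set String) :
    all_stats.foldl
      (fun (st : PySem.Set String × PySem.Set String) pair =>
        let st1 := pair.1.foldl
          (fun (st : PySem.Set String × PySem.Set String) read_name =>
            if PySem.Set.contains st.1 read_name then
              (st.1, PySem.Set.add st.2 read_name)
            else
              (PySem.Set.add st.1 read_name, st.2)) st
        (st1.1, pair.2.foldl (fun td read_name => PySem.Set.add td read_name) st1.2))
      st
    = (pvEvents all_stats).foldl pvStep st := by
  induction all_stats generalizing st with
  | nil => rfl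
  | cons p rest ih =>
    simp only [List.foldl_cons, pvEvents, List.flatMap_cons, List.foldl_append, List.foldl_map, ih]
    congr 1
    simp only [pvStep, if_true, if_false, Bool.false_eq_true]
    rw [snd_fold]

lemma contains_eq_decide_mem (s : PySem.Set String) (n : String) :
    PySem.Set.contains s n = decide (n ∈ s) := by
  by_cases h : n ∈ s
  · rw [(PySem.Set.contains_iff s n).mpr h, decide_eq_true h]
  · rw [decide_eq_false h]
    cases hb : PySem.Set.contains s n
    · rfl
    · exact absurd ((PySem.Set.contains_iff s n).mp hb) h

lemma main_invariant (rest pre : List (Bool × String)) (c d : PySem.Set String)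
    (hc : ∀ n, n ∈ c ↔ (true, n) ∈ pre) :
    (rest.foldl pvStep (c, d)).2 = (pvFlags pre rest).foldl PySem.Set.add d := by
  induction rest generalizing pre c d with
  | nil => rfl
  | cons e rest ih =>
    obtain ⟨e1, m⟩ := e
    simp only [List.foldl_cons, pvFlags, pvStep]
    cases e1 with
    | true =>
      rw [if_pos rfl]
      by_cases hm : (true, m) ∈ pre
      · rw [if_pos ((PySem.Set.contains_iff c m).mpr ((hc m).mpr hm))]
        simp only [if_pos (Or.inr hm), List.foldl_append, List.foldl_cons, List.foldl_nil]
        exact ih (pre ++ [(true, m)]) c _ (by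
          intro n
          rw [hc]
          simp only [List.mem_append, List.mem_singleton, Prod.mk.injEq, true_and]
          constructor
          · exact Or.inl
          · rintro (h | rfl)
            · exact h
            · exact hm)
      · have hcc : PySem.Set.contains c m = false := by
          rw [contains_eq_decide_mem]
          exact decide_eq_false (fun h => hm ((hc m).mp h))
        have hne : ¬ ((true : Bool) = false ∨ (true, m) ∈ pre) := by
          simp [hm]
        rw [if_neg (fun h => Bool.false_ne_true (hcc ▸ h)), if_neg hne]
        simp only [List.nil_append]
        exact ih (pre ++ [(true, m)]) (PySem.Set.add c m) d (by
          intro n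
          rw [PySem.Set.mem_add]
          simp only [List.mem_append, List.mem_singleton, Prod.mk.injEq, true_and, hc])
    | false =>
      rw [if_neg Bool.false_ne_true]
      simp only [List.foldl_append]
      exact ih (pre ++ [(false, m)]) c _ (by
        intro n
        rw [hc]
        simp [List.mem_append])

lemma get?_none_iff_contains_false (d : PySem.Dict String Int) (n : String) :
    d.get? n = none ↔ d.contains n = false := by
  rw [PySem.Dict.contains_eq_isSome_get?]; cases d.get? n <;> simp

lemma pvFirst_get (l : List (Bool × String)) (s : Int) (d : PySem.Dict String Int) (n : String) :
    ((PySem.List.enumerate l s).foldl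
        (fun d p => if p.2.1 && !(d.contains p.2.2) then d.insert p.2.2 p.1 else d) d).get? n
      = if d.contains n then d.get? n
        else (l.findIdx? (fun e => e == (true, n))).map (fun k => s + (k : Int)) := by
  induction l generalizing s d with
  | nil =>
    simp only [PySem.List.enumerate_nil, List.foldl_nil, List.findIdx?_nil]
    split_ifs with h
    · rfl
    · rw [(get?_none_iff_contains_false d n).mpr (by simp [h])]
      rfl
  | cons e l ih =>
    obtain ⟨b, m⟩ := e
    rw [PySem.List.enumerate_cons, List.foldl_cons, List.findIdx?_cons]
    cases b with
    | false =>
      have hstep : (if (false, m).1 && !(d.contains (false, m).2)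
          then d.insert (false, m).2 (s, (false, m)).1 else d) = d := by simp
      rw [show (((false, m) : Bool × String) == (true, n)) = false by simp, if_neg
        Bool.false_ne_true, hstep, ih]
      split_ifs with h
      · rfl
      · cases l.findIdx? (fun e => e == (true, n)) <;> simp <;> omega
    | true =>
      by_cases hcm : d.contains m = true
      · have hstep : (if (true, m).1 && !(d.contains (true, m).2)
            then d.insert (true, m).2 (s, (true, m)).1 else d) = d := by simp [hcm]
        rw [hstep, ih]
        by_cases hn : d.contains n = true
        · rw [if_pos hn, if_pos hn]
        · have hnm : ¬ (n = m) := fun h => hn (h ▸ hcm)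
          rw [if_neg hn, if_neg hn,
            show (((true, m) : Bool × String) == (true, n)) = false by
              simp [Ne.symm hnm], if_neg Bool.false_ne_true]
          cases l.findIdx? (fun e => e == (true, n)) <;> simp <;> omega
      · have hstep : (if (true, m).1 && !(d.contains (true, m).2)
            then d.insert (true, m).2 (s, (true, m)).1 else d) = d.insert m s := by
          simp [hcm]
        rw [hstep, ih]
        by_cases hn : n = m
        · subst hn
          rw [if_pos (by simp),
            PySem.Dict.get?_insert_self,
            show (((true, n) : Bool × String) == (true, n)) = true by simp,
            if_pos rfl, if_neg (by simp [hcm])]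
          simp
        · have h1 : (d.insert m s).contains n = d.contains n := by
            rw [PySem.Dict.contains_insert]
            simp [hn]
          have h2 : (d.insert m s).get? n = d.get? n := by
            rw [PySem.Dict.get?_insert, if_neg hn]
          rw [h1, h2,
            show (((true, m) : Bool × String) == (true, n)) = false by simp [Ne.symm hn],
            if_neg Bool.false_ne_true]
          split_ifs with h
          · rfl
          · cases l.findIdx? (fun e => e == (true, n)) <;> simp <;> omega

lemma flagged_eq (full rest pre : List (Bool × String)) (hfull : full = pre ++ rest) :
    (PySem.List.enumerate rest (pre.length : Int)).filterMap (fun p =>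
      if p.2.1 = false then some p.2.2
      else match (pvFirst full).get? p.2.2 with
        | some j => if j < p.1 then some p.2.2 else none
        | none => none)
    = pvFlags pre rest := by
  induction rest generalizing pre with
  | nil => rfl
  | cons e rest ih =>
    obtain ⟨b, m⟩ := e
    rw [PySem.List.enumerate_cons, List.filterMap_cons]
    have hrec := ih (pre ++ [(b, m)]) (by rw [hfull, List.append_assoc]; rfl)
    rw [List.length_append, List.length_singleton, Nat.cast_add, Nat.cast_one] at hrec
    cases b with
    | false =>
      simp only [List.filterMap_cons, pvFlags, if_pos (Or.inl rfl)]
      simp [hrec]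
    | true =>
      have hget : (pvFirst full).get? m
          = (full.findIdx? (fun e => e == ((true, m) : Bool × String))).map
              (fun k => (0 : Int) + (k : Int)) := by
        rw [pvFirst, pvFirst_get, if_neg (by simp [PySem.Dict.contains_empty])]
      by_cases hm : ((true, m) : Bool × String) ∈ pre
      · have hsome : (pre.findIdx? (fun e => e == ((true, m) : Bool × String))).isSome := by
          rw [List.findIdx?_isSome, List.any_eq_true]
          exact ⟨(true, m), hm, by simp⟩
        obtain ⟨k, hk⟩ := Option.isSome_iff_exists.mp hsome
        have hklt : k < pre.length := (List.findIdx?_eq_some_iff_findIdx_eq.mp hk).1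
        have hfull' : full.findIdx? (fun e => e == ((true, m) : Bool × String)) = some k := by
          rw [hfull, List.findIdx?_append, hk]; rfl
        have hget2 : (pvFirst full).get? m = some ((0 : Int) + (k : Int)) := by
          rw [hget, hfull']; rfl
        have hlt : ((0 : Int) + (k : Int)) < ((pre.length : Nat) : Int) := by push_cast; omega
        simp only [List.filterMap_cons, pvFlags, if_pos (Or.inr hm)]
        simp [hget2, hklt, hrec]
      · have hnone : pre.findIdx? (fun e => e == ((true, m) : Bool × String)) = none := by
          rw [List.findIdx?_eq_none_iff]
          intro x hx
          by_cases hxe : x = (true, m)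
          · exact absurd (hxe ▸ hx) hm
          · simp [hxe]
        have hfull' : full.findIdx? (fun e => e == ((true, m) : Bool × String))
            = some pre.length := by
          rw [hfull, List.findIdx?_append, hnone, List.findIdx?_cons, if_pos (by simp)]
          simp
        have hget2 : (pvFirst full).get? m = some ((0 : Int) + (pre.length : Int)) := by
          rw [hget, hfull']; simp
        have hnlt : ¬ (((0 : Int) + (pre.length : Int)) < ((pre.length : Nat) : Int)) := by
          push_cast; omega
        have hne : ¬ ((true : Bool) = false ∨ ((true, m) : Bool × String) ∈ pre) := by
          simp [hm]
        simp only [List.filterMap_cons, pvFlags, if_neg hne]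
        simp [hget2, hnlt, hrec]

-- ===== VERDICT (by name: the statement is the Claim_ definition above) =====
theorem total_delete_spec : Claim_equal_total_delete := by
  intro all_stats _
  unfold Spec_total_delete total_delete total_delete_alt
  rw [foldl_A_events, main_invariant (pvEvents all_stats) [] PySem.Set.empty PySem.Set.empty
        (by intro n; simp [PySem.Set.empty])]
  have h := flagged_eq (pvEvents all_stats) (pvEvents all_stats) [] (by simp)
  simp only [List.length_nil, Nat.cast_zero] at h
  show _ = PySem.Set.ofList _
  rw [h, PySem.Set.ofList_eq_foldl]
  rfl
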